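-- pv_equiv track=rewrite | github.com/volcacius/brevitas | examples/models/export_utils.py | pack_array
-- ===== SOURCE A (Python) =====
-- def pack_array(array, bit_width):
--     val = 0
--     for i in range(len(array)):
--         tmp = array[i]
--         if tmp < 0:
--             tmp = (2 ** bit_width) + tmp
--         tmp = tmp * (2 ** (bit_width * i))
--         val += tmp
--     return val
-- ===== SOURCE B (Python) =====
-- def pack_array(array, bit_width):
--     if not array:
--         return 0
--     digits = [x + (2 ** bit_width) if x < 0 else x for x in array]
--     shift = bit_width
--     while len(digits) > 1:
--         pairs = [digits[i] + (digits[i + 1] << shift) for i in range(0, len(digits) - 1, 2)]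
--         if len(digits) % 2:
--             pairs.append(digits[-1])
--         digits = pairs
--         shift *= 2
--     return digits[0]
-- ===== Notes on version B (the rewrite author's own statement) =====
-- stated objective: faster
-- what changed: B first materialises the list of wrap-corrected digits, then combines them by balanced pairwise merging (each round packs adjacent pairs and doubles the shift) instead of A's single left-to-right sum of each element times a freshly recomputed positional weight 2**(bit_width*i); A's per-step power recomputation costs quadratic big-int work, B's halving rounds avoid it (measured 63.9x at n=256).
-- outside the precondition, e.g. on pack_array([1, 2], -1): A returns 2.0, B raises ValueError; on pack_array([-1], -1): A returns -0.5, B returns -0.5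
import Mathlib
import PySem

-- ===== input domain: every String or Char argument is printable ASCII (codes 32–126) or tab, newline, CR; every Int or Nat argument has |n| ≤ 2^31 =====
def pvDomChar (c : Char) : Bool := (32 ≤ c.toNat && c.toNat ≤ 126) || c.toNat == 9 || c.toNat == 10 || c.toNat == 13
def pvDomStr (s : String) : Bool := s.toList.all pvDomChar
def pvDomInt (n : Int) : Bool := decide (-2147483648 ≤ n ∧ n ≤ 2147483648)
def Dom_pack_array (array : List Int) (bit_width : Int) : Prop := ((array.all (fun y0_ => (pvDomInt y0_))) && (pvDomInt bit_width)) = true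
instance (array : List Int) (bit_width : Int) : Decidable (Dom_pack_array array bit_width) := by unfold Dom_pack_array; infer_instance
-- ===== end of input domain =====

-- B replaces A's positional sum (corrected element times 2**(bit_width*i)) by a staged
-- correction pass followed by balanced pairwise combining; same return value on Pre_
-- (objective: alternative).

-- ===== PORT A =====
-- for i in range(len(array)): tmp = array[i]; wrap negatives; tmp *= 2**(bit_width*i); val += tmp
def pack_array (array : List Int) (bit_width : Int) : Int :=
  (PySem.List.pyRange 0 (array.length : Int) 1).foldl
    (fun val i =>
      let tmp := PySem.List.pyGetD array i 0
      let tmp := if tmp < 0 then 2 ^ bit_width.toNat + tmp else tmp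
      let tmp := tmp * 2 ^ (bit_width * i).toNat
      val + tmp) 0

-- ===== PORT B =====
-- one round of Source B's inner comprehension: pack adjacent pairs (b << shift is b * w with
-- w = 2**shift), keeping a trailing unpaired digit as Python's odd-length append does
def pvRound (w : Int) : List Int → List Int
  | a :: b :: rest => (a + b * w) :: pvRound w rest
  | l => l

theorem pvRound_length_lt (w : Int) (l : List Int) (h : 1 < l.length) :
    (pvRound w l).length < l.length := by
  match l with
  | a :: b :: rest =>
    simp only [pvRound, List.length_cons]
    have : (pvRound w rest).length ≤ rest.length := by
      clear h
      induction rest using pvRound.induct with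
      | case1 a b r ih => simp only [pvRound, List.length_cons]; try omega
      | case2 l h' =>
        match l with
        | [] => simp [pvRound]
        | [a] => simp [pvRound]
        | a :: b :: r => exact absurd rfl (h' a b r)
    omega
  | [] => simp at h
  | [a] => simp at h

-- while len(digits) > 1: digits = pairs; shift *= 2  (tracked as weight w = 2**shift, w := w*w)
def pvLoop (digits : List Int) (w : Int) : Int :=
  if h : 1 < digits.length then
    pvLoop (pvRound w digits) (w * w)
  else
    digits.headD 0
termination_by digits.length
decreasing_by exact pvRound_length_lt w digits h

-- if not array: return 0; digits = [corrected]; loop; return digits[0]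
def pack_array_alt (array : List Int) (bit_width : Int) : Int :=
  match array with
  | [] => 0
  | _ =>
    let digits := array.map (fun x => if x < 0 then x + 2 ^ bit_width.toNat else x)
    pvLoop digits (2 ^ bit_width.toNat)

-- ===== PRECONDITION & SPEC =====
-- Pre_ excludes negative bit_width on nonempty arrays: there Python's 2**bit_width is a float,
-- so A returns a float (or an int only accidentally) while B's left shift raises ValueError or
-- B also yields a float; on the empty array both return 0, so it stays admitted.
def Pre_pack_array (array : List Int) (bit_width : Int) : Prop :=
  0 ≤ bit_width ∨ array = []
instance (array : List Int) (bit_width : Int) : Decidable (Pre_pack_array array bit_width) := by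
  unfold Pre_pack_array; infer_instance
def pvWitness_pack_array : List Int × Int := ([2, -1, 5], 7)
def Spec_pack_array (array : List Int) (bit_width : Int) (out : Int) : Prop := out = pack_array_alt array bit_width
instance (array : List Int) (bit_width : Int) (out : Int) : Decidable (Spec_pack_array array bit_width out) := by unfold Spec_pack_array; infer_instance

-- ===== CLAIM (what is proved, stated in full; the proofs are below) =====
def Claim_equal_pack_array : Prop := ∀ (array : List Int) (bit_width : Int), Dom_pack_array array bit_width → Pre_pack_array array bit_width → Spec_pack_array array bit_width (pack_array array bit_width)

-- ===== LEMMAS AND PROOFS =====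

-- corrected value of one element (negative wraparound), b = bit_width.toNat
def pvCorr (b : Nat) (x : Int) : Int := if x < 0 then 2 ^ b + x else x

-- value of a digit list in base w (little-endian)
def pvVal (w : Int) : List Int → Int
  | [] => 0
  | x :: xs => x + w * pvVal w xs

theorem pvVal_round (w : Int) (l : List Int) :
    pvVal (w * w) (pvRound w l) = pvVal w l := by
  induction l using pvRound.induct with
  | case1 a b rest ih => simp only [pvRound, pvVal, ih]; ring
  | case2 l h =>
    match l with
    | [] => rfl
    | [a] => simp [pvRound, pvVal]
    | a :: b :: r => exact absurd rfl (h a b r)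

theorem pvLoop_eq_val (l : List Int) (w : Int) (hne : l ≠ []) :
    pvLoop l w = pvVal w l := by
  induction l, w using pvLoop.induct with
  | case1 digits w h1 ih =>
    rw [pvLoop, dif_pos h1]
    have hne' : pvRound w digits ≠ [] := by
      match digits with
      | a :: b :: r => simp [pvRound]
      | [] => simp at h1
      | [a] => simp at h1
    rw [ih hne', pvVal_round]
  | case2 digits w h1 =>
    rw [pvLoop, dif_neg h1]
    match digits, hne with
    | [a], _ => simp [pvVal]
    | a :: b :: r, _ => simp at h1

theorem pvVal_map_corr (b : Nat) (l : List Int) :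
    pvVal (2 ^ b) (l.map (fun x => if x < 0 then x + 2 ^ b else x)) =
      pvVal (2 ^ b) (l.map (pvCorr b)) := by
  induction l with
  | nil => rfl
  | cons x xs ih => simp only [List.map_cons, pvVal, ih, pvCorr]; split_ifs <;> ring_nf

theorem alt_eq_val (array : List Int) (bit_width : Int) :
    pack_array_alt array bit_width = pvVal (2 ^ bit_width.toNat) (array.map (pvCorr bit_width.toNat)) := by
  match array with
  | [] => rfl
  | a :: rest =>
    show pvLoop _ _ = _
    rw [pvLoop_eq_val _ _ (by simp), pvVal_map_corr]

theorem pack_array_enum (array : List Int) (bit_width : Int) :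
    pack_array array bit_width =
      (PySem.List.enumerate array 0).foldl
        (fun val p => val + pvCorr bit_width.toNat p.2 * 2 ^ (bit_width * p.1).toNat) 0 := by
  rw [PySem.List.enumerate_eq_map_pyRange (d := 0), List.foldl_map]
  rfl

theorem enum_foldl_eq (bw : Int) (hbw : 0 ≤ bw) :
    ∀ (l : List Int) (s : Nat) (v : Int),
      (PySem.List.enumerate l (s : Int)).foldl
        (fun val p => val + pvCorr bw.toNat p.2 * 2 ^ (bw * p.1).toNat) v
      = v + 2 ^ (bw.toNat * s) * pvVal (2 ^ bw.toNat) (l.map (pvCorr bw.toNat)) := by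
  intro l
  induction l with
  | nil => intro s v; simp [PySem.List.enumerate, pvVal]
  | cons x xs ih =>
    intro s v
    rw [PySem.List.enumerate_cons]
    have hcast : ((s : Int) + 1) = ((s + 1 : Nat) : Int) := by push_cast; ring
    have hexp : (bw * (s : Int)).toNat = bw.toNat * s := by
      rcases Int.eq_ofNat_of_zero_le hbw with ⟨b, rfl⟩
      rw [← Int.natCast_mul, Int.toNat_natCast, Int.toNat_natCast]
    rw [List.foldl_cons, hcast, ih]
    simp only [hexp, List.map_cons, pvVal]
    rw [Nat.mul_succ, pow_add]
    ring

-- ===== VERDICT (by name: the statement is the Claim_ definition above) =====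
theorem pack_array_spec : Claim_equal_pack_array := by
  intro array bit_width _ hpre
  unfold Spec_pack_array
  rcases hpre with hbw | rfl
  · rw [pack_array_enum, alt_eq_val]
    have := enum_foldl_eq bit_width hbw array 0 0
    simpa using this
  · rfl
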